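-- pv_equiv track=rewrite | github.com/luisbfsousa/leci | 1o1s/FP/exercicios_apa/closest value.py | findClosestValueIndex
-- ===== SOURCE A (Python) =====
-- def findClosestValueIndex(arr, val):
--     if len(arr) == 0:
--         return -1
--
--     closest = arr[0]
--     closestIndex = 0
--
--     for i in range(len(arr)):
--         if abs(arr[i] - val) < abs(closest - val):
--             closest = arr[i]
--             closestIndex = i
--
--     return closestIndex
-- ===== SOURCE B (Python) =====
-- def findClosestValueIndex(arr, val):
--     if len(arr) == 0:
--         return -1
--     dists = [abs(x - val) for x in arr]
--     m = min(dists)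
--     return dists.index(m)
-- ===== Notes on version B (the rewrite author's own statement) =====
-- stated objective: simpler
-- what changed: Replaces the fused best-so-far tracking loop over indices with a multi-pass decomposition: build a distance table, take its minimum, then locate that minimum's first index.
import Mathlib
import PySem

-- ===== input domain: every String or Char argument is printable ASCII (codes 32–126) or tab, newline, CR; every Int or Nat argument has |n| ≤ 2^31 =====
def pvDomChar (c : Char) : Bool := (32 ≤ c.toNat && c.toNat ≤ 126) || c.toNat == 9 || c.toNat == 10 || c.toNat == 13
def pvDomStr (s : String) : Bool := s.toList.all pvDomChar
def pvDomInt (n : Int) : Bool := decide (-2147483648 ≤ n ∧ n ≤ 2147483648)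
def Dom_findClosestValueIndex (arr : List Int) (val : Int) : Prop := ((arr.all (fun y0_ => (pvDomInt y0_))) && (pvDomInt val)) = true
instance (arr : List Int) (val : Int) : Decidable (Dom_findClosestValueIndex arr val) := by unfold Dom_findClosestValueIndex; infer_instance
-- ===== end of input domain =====

-- B replaces A's fused best-so-far loop with a three-pass decomposition (distance table, min, first index); same cost, different structure.

-- ===== PORT A =====
def findClosestValueIndex (arr : List Int) (val : Int) : Int :=
  if arr.length = 0 then -1
  else
    -- closest = arr[0]; closestIndex = 0; for i in range(len(arr)): …
    let st := (PySem.List.pyRange 0 arr.length 1).foldl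
      (fun (s : Int × Int) i =>
        if |PySem.List.pyGetD arr i 0 - val| < |s.1 - val| then (PySem.List.pyGetD arr i 0, i) else s)
      (PySem.List.pyGetD arr 0 0, 0)
    st.2

-- ===== PORT B =====
def findClosestValueIndex_alt (arr : List Int) (val : Int) : Int :=
  if arr.length = 0 then -1
  else
    let dists := arr.map (fun x => |x - val|)
    match PySem.List.min? dists (fun x => x) with
    | none => -1  -- unreachable: dists is nonempty
    | some m =>
      match PySem.List.index? dists m with
      | some k => (k : Int)
      | none => -1  -- unreachable: m ∈ dists

-- ===== PRECONDITION & SPEC =====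
def Spec_findClosestValueIndex (arr : List Int) (val : Int) (out : Int) : Prop := out = findClosestValueIndex_alt arr val
instance (arr : List Int) (val : Int) (out : Int) : Decidable (Spec_findClosestValueIndex arr val out) := by unfold Spec_findClosestValueIndex; infer_instance

-- ===== CLAIM (what is proved, stated in full; the proofs are below) =====
def Claim_equal_findClosestValueIndex : Prop := ∀ (arr : List Int) (val : Int), Dom_findClosestValueIndex arr val → Spec_findClosestValueIndex arr val (findClosestValueIndex arr val)

-- ===== LEMMAS AND PROOFS =====

-- the body of A's loop, as a function of the (index, element) pair
def pvStep (val : Int) (s : Int × Int) (p : Int × Int) : Int × Int :=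
  if |p.2 - val| < |s.1 - val| then (p.2, p.1) else s

theorem pvMain (val : Int) (t : List Int) : ∀ (a : Int),
    ∃ j : Nat,
      ((PySem.List.enumerate (a :: t) 0).foldl (pvStep val) (a, 0)).2 = (j : Int) ∧
      PySem.List.min? ((a :: t).map (fun x => |x - val|)) (fun x => x)
        = some |((PySem.List.enumerate (a :: t) 0).foldl (pvStep val) (a, 0)).1 - val| ∧
      PySem.List.index? ((a :: t).map (fun x => |x - val|))
        |((PySem.List.enumerate (a :: t) 0).foldl (pvStep val) (a, 0)).1 - val| = some j := by
  induction t using List.reverseRecOn with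
  | nil =>
    intro a
    refine ⟨0, ?_, ?_, ?_⟩ <;>
      simp [PySem.List.enumerate, pvStep, PySem.List.min?, PySem.List.index?]
  | append_singleton t x ih =>
    intro a
    obtain ⟨j, hj, hmin, hidx⟩ := ih a
    have hmem : |((PySem.List.enumerate (a :: t) 0).foldl (pvStep val) (a, 0)).1 - val|
        ∈ (a :: t).map (fun y => |y - val|) := by
      have := PySem.List.index?_isSome_iff
        ((a :: t).map (fun y => |y - val|))
        |((PySem.List.enumerate (a :: t) 0).foldl (pvStep val) (a, 0)).1 - val|
      rw [hidx] at this; simpa using this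
    have hisMin := PySem.List.min?_isMin hmin
    have hcons : a :: (t ++ [x]) = (a :: t) ++ [x] := by simp
    rw [hcons, PySem.List.enumerate_append]
    have henum1 : PySem.List.enumerate [x] (0 + (a :: t).length) = [(((a :: t).length : Int), x)] := by
      simp [PySem.List.enumerate]
    rw [henum1, List.foldl_append]
    set st := (PySem.List.enumerate (a :: t) 0).foldl (pvStep val) (a, 0) with hst
    set m := |st.1 - val| with hm
    have hfold : (t.map (fun y => |y - val|)).foldl min |a - val| = m := by
      have h2 := hmin
      rw [List.map_cons, PySem.List.min?_id_cons] at h2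
      exact Option.some_inj.mp h2
    have hmap : ((a :: t) ++ [x]).map (fun y => |y - val|)
        = (a :: t).map (fun y => |y - val|) ++ [|x - val|] := by simp
    have hminNew : PySem.List.min? (((a :: t) ++ [x]).map (fun y => |y - val|)) (fun y => y)
        = some (min m |x - val|) := by
      rw [hmap, List.map_cons, List.cons_append, PySem.List.min?_id_cons,
        List.foldl_append]
      simp [hfold]
    by_cases hlt : |x - val| < m
    · -- new element strictly better: minimum moves to the last position
      have hnot : |x - val| ∉ (a :: t).map (fun y => |y - val|) := by
        intro hin
        exact absurd (hisMin _ hin) (not_le.mpr hlt)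
      refine ⟨(a :: t).length, ?_, ?_, ?_⟩
      · simp [List.foldl, pvStep, hm ▸ hlt]
      · rw [hminNew]
        have : pvStep val st (((a :: t).length : Int), x) = (x, ((a :: t).length : Int)) := by
          simp [pvStep, hm ▸ hlt]
        rw [List.foldl, this]
        simp [min_eq_right (le_of_lt hlt)]
      · have : pvStep val st (((a :: t).length : Int), x) = (x, ((a :: t).length : Int)) := by
          simp [pvStep, hm ▸ hlt]
        rw [List.foldl, this, List.foldl_nil, hmap]
        simpa using PySem.List.index?_append_singleton_self _ _ hnot
    · have hle : m ≤ |x - val| := not_lt.mp hlt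
      have hkeep : pvStep val st (((a :: t).length : Int), x) = st := by
        simp [pvStep, hm ▸ hlt]
      refine ⟨j, ?_, ?_, ?_⟩
      · rw [List.foldl, hkeep]; exact hj
      · rw [hminNew, List.foldl, hkeep, min_eq_left hle, List.foldl_nil, hm]
      · rw [List.foldl, hkeep, List.foldl_nil, hmap, ← hm,
          PySem.List.index?_append_of_mem _ hmem]
        exact hidx

-- ===== VERDICT (by name: the statement is the Claim_ definition above) =====
theorem findClosestValueIndex_spec : Claim_equal_findClosestValueIndex := by
  intro arr val _
  unfold Spec_findClosestValueIndex
  cases arr with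
  | nil => rfl
  | cons a t =>
    obtain ⟨j, hj, hmin, hidx⟩ := pvMain val t a
    have hA : findClosestValueIndex (a :: t) val
        = ((PySem.List.enumerate (a :: t) 0).foldl (pvStep val) (a, 0)).2 := by
      unfold findClosestValueIndex
      rw [if_neg (by simp)]
      rw [PySem.List.enumerate_eq_map_pyRange (a :: t) 0, List.foldl_map]
      simp [pvStep, PySem.List.pyGetD_zero_cons, PySem.List.len]
    have hB : findClosestValueIndex_alt (a :: t) val = (j : Int) := by
      unfold findClosestValueIndex_alt
      rw [if_neg (by simp)]
      simp only [hmin, hidx]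
    rw [hA, hB, hj]
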